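-- pv_equiv track=rewrite | github.com/mjun0328/Algorithm | 백준/Silver/1417. 국회의원 선거/국회의원 선거.py | solution
-- ===== SOURCE A (Python) =====
-- def solution(candicate, N):
--   cnt = 0
--   while True:
--     # 가장 지지자가 많은 후보 찾기(같은 경우 뒷 번호 후보 선택)
--     maxIdx = 0
--     for i in range(1, N):
--       if candicate[maxIdx] <= candicate[i]:
--         maxIdx = i
--
--     if maxIdx == 0:
--       break # 다솜의 지지자가 가장 많음
--     else:
--       candicate[0] += 1
--       candicate[maxIdx] -= 1
--       cnt += 1
--   return cnt
-- ===== SOURCE B (Python) =====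
-- def solution(candicate, N):
--     # Binary search for the least k such that k transferred votes suffice to
--     # bring every opponent strictly below Dasom's total candicate[0] + k.
--     if N <= 1:
--         return 0
--     d = candicate[0]
--     opps = candicate[1:N]
--     lo, hi = 0, max(max(opps) - d + 1, 0)
--     while lo < hi:
--         mid = (lo + hi) // 2
--         need = 0
--         for v in opps:
--             if v >= d + mid:
--                 need += v - (d + mid - 1)
--         if need <= mid:
--             hi = mid
--         else:
--             lo = mid + 1
--     return lo
-- ===== Notes on version B (the rewrite author's own statement) =====
-- stated objective: faster
-- what changed: Replaces A's simulate-one-transfer-at-a-time loop (rescanning all N candidates per transferred vote) by a binary search over the number of transfers k, checking in one pass whether k votes suffice to push every opponent strictly below candicate[0]+k.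
import Mathlib
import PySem

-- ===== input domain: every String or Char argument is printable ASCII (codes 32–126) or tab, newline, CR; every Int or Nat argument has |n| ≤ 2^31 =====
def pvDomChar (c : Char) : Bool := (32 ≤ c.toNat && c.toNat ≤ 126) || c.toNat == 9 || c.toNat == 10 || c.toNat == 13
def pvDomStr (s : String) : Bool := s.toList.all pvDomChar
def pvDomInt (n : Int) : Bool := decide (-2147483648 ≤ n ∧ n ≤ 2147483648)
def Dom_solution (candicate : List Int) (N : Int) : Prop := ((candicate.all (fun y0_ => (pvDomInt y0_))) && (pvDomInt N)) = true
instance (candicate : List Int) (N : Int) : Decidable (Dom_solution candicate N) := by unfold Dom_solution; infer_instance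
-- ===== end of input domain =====

-- B replaces A's O(answer·N) simulate-one-transfer-at-a-time loop by a binary search for the
-- least number k of transfers for which k votes suffice to push every opponent strictly below
-- candicate[0] + k.  A mutates `candicate` in place; the equivalence proved here is about the
-- RETURN value only (B is pure).

-- ===== PORT A =====
-- Lemmas cited by solutionLoop's decreasing_by (they must precede the definition).

-- invariant of the running arg-max scan: the result is the start or a scanned index, and its
-- value dominates the start's value and every scanned value
theorem pvArgmaxSpec (g : Int → Int) (l : List Int) (a : Int) :
    (l.foldl (fun m i => if g m ≤ g i then i else m) a = a ∨
       l.foldl (fun m i => if g m ≤ g i then i else m) a ∈ l) ∧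
    g a ≤ g (l.foldl (fun m i => if g m ≤ g i then i else m) a) ∧
    ∀ i ∈ l, g i ≤ g (l.foldl (fun m i => if g m ≤ g i then i else m) a) := by
  induction l generalizing a with
  | nil => simp
  | cons x t ih =>
    simp only [List.foldl_cons]
    by_cases hc : g a ≤ g x
    · rw [if_pos hc]
      rcases ih x with ⟨h1, h2, h3⟩
      refine ⟨?_, le_trans hc h2, ?_⟩
      · rcases h1 with h | h
        · exact Or.inr (by rw [h]; exact List.mem_cons_self)
        · exact Or.inr (List.mem_cons_of_mem _ h)
      · intro i hi
        rcases List.mem_cons.mp hi with rfl | hi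
        · exact h2
        · exact h3 i hi
    · rw [if_neg hc]
      rcases ih a with ⟨h1, h2, h3⟩
      refine ⟨?_, h2, ?_⟩
      · rcases h1 with h | h
        · exact Or.inl h
        · exact Or.inr (List.mem_cons_of_mem _ h)
      · intro i hi
        rcases List.mem_cons.mp hi with h | hi'
        · rw [h]
          exact le_trans (show g x ≤ g a by omega) h2
        · exact h3 i hi'

theorem pvGetDSetNe (l : List Int) (n k : Nat) (v d : Int) (h : n ≠ k) :
    (l.set n v).getD k d = l.getD k d := by
  simp [List.getD_eq_getElem?_getD, List.getElem?_set, h]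

theorem pvGetDSetLe (l : List Int) (n k : Nat) (v d : Int) (hv : v ≤ l.getD n d) :
    (l.set n v).getD k d ≤ l.getD k d := by
  by_cases h : n = k
  · subst h
    by_cases hl : n < l.length
    · simp [List.getD_eq_getElem?_getD, List.getElem?_set, hl] at hv ⊢
      simpa [List.getElem?_eq_getElem hl] using hv
    · simp [List.getD_eq_getElem?_getD, List.getElem?_set, hl,
        List.getElem?_eq_none (Nat.le_of_not_lt hl)]
  · exact le_of_eq (pvGetDSetNe l n k v d h)

theorem pvFoldlMaxLe (f : Int → Int) (l : List Int) :
    ∀ a B : Int, a ≤ B → (∀ i ∈ l, f i ≤ B) →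
      l.foldl (fun x i => max x (f i)) a ≤ B := by
  induction l with
  | nil => intro a B ha _; simpa using ha
  | cons x t ih =>
    intro a B ha hub
    simp only [List.foldl_cons]
    exact ih _ B (max_le ha (hub x List.mem_cons_self)) fun i hi => hub i (List.mem_cons_of_mem _ hi)

-- inner 'for i in range(1, N)' scan of A computing maxIdx
def pyArgMax (c : List Int) (N : Int) : Int :=
  (PySem.List.pyRange 1 N).foldl
    (fun maxIdx i =>
      if PySem.List.pyGetD c maxIdx 0 ≤ PySem.List.pyGetD c i 0 then i else maxIdx) 0

-- running max of the scanned values; used only as the termination measure of solutionLoop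
def oppMax (c : List Int) (N : Int) : Int :=
  (PySem.List.pyRange 1 N).foldl (fun a i => max a (PySem.List.pyGetD c i 0))
    (PySem.List.pyGetD c 0 0 - 1)

theorem pvMeasureDec (c : List Int) (N : Int) (h : ¬(pyArgMax c N = 0 ∨ c = [])) :
    (oppMax ((c.set 0 (PySem.List.pyGetD c 0 0 + 1)).set (pyArgMax c N).toNat
        (PySem.List.pyGetD (c.set 0 (PySem.List.pyGetD c 0 0 + 1)) (pyArgMax c N) 0 - 1)) N -
      PySem.List.pyGetD ((c.set 0 (PySem.List.pyGetD c 0 0 + 1)).set (pyArgMax c N).toNat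
        (PySem.List.pyGetD (c.set 0 (PySem.List.pyGetD c 0 0 + 1)) (pyArgMax c N) 0 - 1)) 0 0 + 1).toNat <
    (oppMax c N - PySem.List.pyGetD c 0 0 + 1).toNat := by
  push_neg at h
  obtain ⟨hm, hc⟩ := h
  have hspec := pvArgmaxSpec (fun j => PySem.List.pyGetD c j 0) (PySem.List.pyRange 1 N) 0
  rw [show (PySem.List.pyRange 1 N).foldl
      (fun m i => if PySem.List.pyGetD c m 0 ≤ PySem.List.pyGetD c i 0 then i else m) 0 = pyArgMax c N from rfl] at hspec
  obtain ⟨hmem, hge, hub⟩ := hspec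
  rcases hmem with hmem | hmem
  · exact absurd hmem hm
  have hm1 : 1 ≤ pyArgMax c N := (PySem.List.mem_pyRange_one.mp hmem).1
  have hlen : 0 < c.length := List.length_pos_iff.mpr hc
  set m := pyArgMax c N with hmdef
  set c1 := c.set 0 (PySem.List.pyGetD c 0 0 + 1) with hc1
  set c2 := c1.set m.toNat (PySem.List.pyGetD c1 m 0 - 1) with hc2
  -- Dasom's count goes up by one
  have hd2 : PySem.List.pyGetD c2 0 0 = PySem.List.pyGetD c 0 0 + 1 := by
    rw [PySem.List.pyGetD_zero, PySem.List.pyGetD_zero, hc2,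
      pvGetDSetNe _ _ _ _ _ (by omega : m.toNat ≠ 0), hc1]
    simp [PySem.List.pyGetD_zero, List.getD_eq_getElem?_getD, List.getElem?_set, hlen]
  -- each scanned value does not go up
  have hvals : ∀ i ∈ PySem.List.pyRange 1 N, PySem.List.pyGetD c2 i 0 ≤ PySem.List.pyGetD c i 0 := by
    intro i hi
    have hi1 : 1 ≤ i := (PySem.List.mem_pyRange_one.mp hi).1
    rw [PySem.List.pyGetD_of_nonneg _ _ (by omega), PySem.List.pyGetD_of_nonneg _ _ (by omega)]
    have h1 : c1.getD i.toNat 0 = c.getD i.toNat 0 :=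
      pvGetDSetNe _ _ _ _ _ (by omega : (0:Nat) ≠ i.toNat)
    have h2 : c2.getD i.toNat 0 ≤ c1.getD i.toNat 0 := by
      apply pvGetDSetLe
      rw [PySem.List.pyGetD_of_nonneg _ _ (by omega : (0:Int) ≤ m)]
      omega
    omega
  have hMle : PySem.List.pyGetD c 0 0 ≤ oppMax c N := by
    have := (PySem.List.le_foldl_max_int (PySem.List.pyRange 1 N)
      (fun i => PySem.List.pyGetD c i 0) (PySem.List.pyGetD c 0 0 - 1)).2 m hmem
    exact le_trans hge this
  have hub' : ∀ i ∈ PySem.List.pyRange 1 N, PySem.List.pyGetD c2 i 0 ≤ oppMax c N := by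
    intro i hi
    exact le_trans (hvals i hi) ((PySem.List.le_foldl_max_int (PySem.List.pyRange 1 N)
      (fun i => PySem.List.pyGetD c i 0) (PySem.List.pyGetD c 0 0 - 1)).2 i hi)
  have h2le : oppMax c2 N ≤ oppMax c N := by
    apply pvFoldlMaxLe
    · rw [hd2]; omega
    · exact hub'
  omega

-- A: 'while True: rescan for maxIdx; stop if it is 0, else transfer one vote'.
-- The 'c = []' disjunct is a totality guard only: there Python raises IndexError (outside Pre_).
def solutionLoop (c : List Int) (N : Int) (cnt : Int) : Int :=
  if pyArgMax c N = 0 ∨ c = [] then cnt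
  else solutionLoop
    ((c.set 0 (PySem.List.pyGetD c 0 0 + 1)).set (pyArgMax c N).toNat
      (PySem.List.pyGetD (c.set 0 (PySem.List.pyGetD c 0 0 + 1)) (pyArgMax c N) 0 - 1))
    N (cnt + 1)
termination_by (oppMax c N - PySem.List.pyGetD c 0 0 + 1).toNat
decreasing_by exact pvMeasureDec c N (by assumption)

def solution (candicate : List Int) (N : Int) : Int := solutionLoop candicate N 0

-- ===== PORT B =====
-- 'need = 0; for v in opps: if v >= d + mid: need += v - (d + mid - 1)'
def needLoop (d mid : Int) (opps : List Int) : Int :=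
  opps.foldl (fun need v => if v ≥ d + mid then need + (v - (d + mid - 1)) else need) 0

-- 'while lo < hi: mid = (lo+hi)//2; ...'
def bsLoop (d : Int) (opps : List Int) (lo hi : Int) : Int :=
  if lo < hi then
    if needLoop d (PySem.Int.floordiv (lo + hi) 2) opps ≤ PySem.Int.floordiv (lo + hi) 2 then
      bsLoop d opps lo (PySem.Int.floordiv (lo + hi) 2)
    else
      bsLoop d opps (PySem.Int.floordiv (lo + hi) 2 + 1) hi
  else lo
termination_by (hi - lo).toNat
decreasing_by
  · have h1 := (PySem.Int.le_floordiv_iff_mul_le (a := lo + hi) (q := lo) (by omega : (0:Int) < 2)).mpr (by omega)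
    have h2 := (PySem.Int.floordiv_lt_iff_lt_mul (a := lo + hi) (q := hi) (by omega : (0:Int) < 2)).mpr (by omega)
    omega
  · have h1 := (PySem.Int.le_floordiv_iff_mul_le (a := lo + hi) (q := lo) (by omega : (0:Int) < 2)).mpr (by omega)
    have h2 := (PySem.Int.floordiv_lt_iff_lt_mul (a := lo + hi) (q := hi) (by omega : (0:Int) < 2)).mpr (by omega)
    omega

-- '.getD 0' in maxv is a totality default only: Python's max(opps) raises there (outside Pre_)
def solution_alt (candicate : List Int) (N : Int) : Int :=
  if N ≤ 1 then 0
  else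
    bsLoop (PySem.List.pyGetD candicate 0 0) (PySem.List.slice candicate (some 1) (some N)) 0
      (max ((PySem.List.max? (PySem.List.slice candicate (some 1) (some N)) (fun v => v)).getD 0 -
        PySem.List.pyGetD candicate 0 0 + 1) 0)

-- ===== PRECONDITION & SPEC =====
-- Pre_ excludes exactly the inputs on which A raises IndexError: 2 ≤ N but the list is shorter
-- than N (A reads candicate[1..N-1] and candicate[0]).
def Pre_solution (candicate : List Int) (N : Int) : Prop :=
  N ≤ 1 ∨ N ≤ (candicate.length : Int)
instance (candicate : List Int) (N : Int) : Decidable (Pre_solution candicate N) := by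
  unfold Pre_solution; infer_instance

def pvWitness_solution : List Int × Int := ([5, 1, 7], 3)

def Spec_solution (candicate : List Int) (N : Int) (out : Int) : Prop := out = solution_alt candicate N
instance (candicate : List Int) (N : Int) (out : Int) : Decidable (Spec_solution candicate N out) := by unfold Spec_solution; infer_instance

-- ===== CLAIM (what is proved, stated in full; the proofs are below) =====
def Claim_equal_solution : Prop := ∀ (candicate : List Int) (N : Int), Dom_solution candicate N → Pre_solution candicate N → Spec_solution candicate N (solution candicate N)

-- ===== LEMMAS AND PROOFS =====

-- the values A's inner scan ranges over, read off the (immutable) current list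
def window (c : List Int) (N : Int) : List Int :=
  (PySem.List.pyRange 1 N).map (fun i => PySem.List.pyGetD c i 0)

-- 'a is the least k ≥ 0 such that k transfers suffice'
def IsAns (d : Int) (vs : List Int) (a : Int) : Prop :=
  0 ≤ a ∧ needLoop d a vs ≤ a ∧ ∀ j : Int, 0 ≤ j → j < a → ¬ needLoop d j vs ≤ j

theorem need_eq_sum (d k : Int) (vs : List Int) :
    needLoop d k vs = (vs.map (fun v => if d + k ≤ v then v - (d + k - 1) else 0)).sum := by
  unfold needLoop
  rw [PySem.List.foldl_congr_mem vs _
    (fun acc v => acc + if d + k ≤ v then v - (d + k - 1) else 0) 0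
    (by intro acc v _
        by_cases h : d + k ≤ v
        · simp [ge_iff_le, h]
        · simp [ge_iff_le, h])]
  rw [PySem.List.foldl_add]
  ring

theorem need_mono (d : Int) (vs : List Int) {j k : Int} (h : j ≤ k) :
    needLoop d k vs ≤ needLoop d j vs := by
  rw [need_eq_sum, need_eq_sum]
  apply List.sum_le_sum
  intro v _
  split_ifs <;> omega

theorem need_zero_of_all_lt (d k : Int) (vs : List Int) (h : ∀ v ∈ vs, v < d + k) :
    needLoop d k vs = 0 := by
  rw [need_eq_sum]
  apply List.sum_eq_zero
  intro x hx
  obtain ⟨v, hv, rfl⟩ := List.mem_map.mp hx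
  rw [if_neg (by have := h v hv; omega)]

theorem need_pos (d k : Int) (vs : List Int) {v : Int} (hv : v ∈ vs) (h : d + k ≤ v) :
    1 ≤ needLoop d k vs := by
  rw [need_eq_sum]
  have hmem : (if d + k ≤ v then v - (d + k - 1) else 0) ∈
      vs.map (fun v => if d + k ≤ v then v - (d + k - 1) else 0) := List.mem_map_of_mem hv
  have hle := List.single_le_sum (l := vs.map (fun v => if d + k ≤ v then v - (d + k - 1) else 0))
    (by intro x hx; obtain ⟨w, _, rfl⟩ := List.mem_map.mp hx; split_ifs <;> omega) _ hmem
  rw [if_pos h] at hle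
  omega

-- one transfer from the (weakly) largest opponent M shifts the answer down by exactly one
theorem step_iff (l r : List Int) (d M k : Int)
    (hub : ∀ v ∈ l ++ M :: r, v ≤ M) (hk : 0 ≤ k) :
    (needLoop d (k + 1) (l ++ M :: r) ≤ k + 1 ↔ needLoop (d + 1) k (l ++ (M - 1) :: r) ≤ k) := by
  have hT : ∀ (d' k' : Int), d' + k' = d + k + 1 →
      ∀ vs : List Int, needLoop d' k' vs =
        (vs.map (fun v => if d + k + 1 ≤ v then v - (d + k) else 0)).sum := by
    intro d' k' hdk vs
    rw [need_eq_sum]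
    congr 1
    apply List.map_congr_left
    intro v _
    split_ifs <;> omega
  rw [hT d (k+1) (by ring), hT (d+1) k (by ring)]
  simp only [List.map_append, List.map_cons, List.sum_append, List.sum_cons]
  by_cases hc : d + k + 1 ≤ M
  · rw [if_pos hc]
    by_cases hc2 : d + k + 1 ≤ M - 1
    · rw [if_pos hc2]; omega
    · rw [if_neg hc2]; omega
  · have h0 : ∀ vs : List Int, (∀ v ∈ vs, v ≤ M) →
        (vs.map (fun v => if d + k + 1 ≤ v then v - (d + k) else 0)).sum = 0 := by
      intro vs hvs
      apply List.sum_eq_zero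
      intro x hx
      obtain ⟨v, hv, rfl⟩ := List.mem_map.mp hx
      rw [if_neg (by have := hvs v hv; omega)]
    rw [h0 l (fun v hv => hub v (List.mem_append_left _ hv)),
      h0 r (fun v hv => hub v (List.mem_append_right _ (List.mem_cons_of_mem _ hv)))]
    rw [if_neg (by omega), if_neg (by omega)]
    omega

-- the arg-max scan stays at the start only if every scanned value is strictly below the start's
theorem pvArgmaxStay (g : Int → Int) (l : List Int) :
    ∀ a : Int, a ∉ l → l.foldl (fun m i => if g m ≤ g i then i else m) a = a →
      ∀ i ∈ l, g i < g a := by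
  induction l with
  | nil => simp
  | cons x t ih =>
    intro a ha hres i hi
    simp only [List.foldl_cons] at hres
    by_cases hc : g a ≤ g x
    · rw [if_pos hc] at hres
      exfalso
      have := (pvArgmaxSpec g t x).1
      rw [hres] at this
      rcases this with h | h
      · exact ha (h ▸ List.mem_cons_self)
      · exact ha (List.mem_cons_of_mem _ h)
    · rw [if_neg hc] at hres
      rcases List.mem_cons.mp hi with rfl | hi
      · omega
      · exact ih a (fun h => ha (List.mem_cons_of_mem _ h)) hres i hi

-- decomposition of the window before/after one of A's transfers
theorem window_step (c : List Int) (N : Int) (hlen : N ≤ (c.length : Int))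
    (hm : pyArgMax c N ∈ PySem.List.pyRange 1 N) :
    ∃ l r, window c N = l ++ PySem.List.pyGetD c (pyArgMax c N) 0 :: r ∧
      window ((c.set 0 (PySem.List.pyGetD c 0 0 + 1)).set (pyArgMax c N).toNat
        (PySem.List.pyGetD (c.set 0 (PySem.List.pyGetD c 0 0 + 1)) (pyArgMax c N) 0 - 1)) N =
        l ++ (PySem.List.pyGetD c (pyArgMax c N) 0 - 1) :: r := by
  set m := pyArgMax c N with hmdef
  obtain ⟨hm1, hm2⟩ := PySem.List.mem_pyRange_one.mp hm
  obtain ⟨L, R, hLR⟩ := List.append_of_mem hm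
  have hnd := PySem.List.nodup_pyRange_one 1 N
  rw [hLR] at hnd
  have hmL : m ∉ L := by
    intro hmem
    rw [List.nodup_append] at hnd
    exact (hnd.2.2 m hmem m List.mem_cons_self) rfl
  have hmR : m ∉ R :=
    (List.nodup_cons.mp (List.Nodup.of_append_right hnd)).1
  set c1 := c.set 0 (PySem.List.pyGetD c 0 0 + 1) with hc1
  set c2 := c1.set m.toNat (PySem.List.pyGetD c1 m 0 - 1) with hc2
  have hgeq : ∀ i ∈ PySem.List.pyRange 1 N, i ≠ m →
      PySem.List.pyGetD c2 i 0 = PySem.List.pyGetD c i 0 := by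
    intro i hi hne
    obtain ⟨hi1, _⟩ := PySem.List.mem_pyRange_one.mp hi
    rw [PySem.List.pyGetD_of_nonneg _ _ (by omega), PySem.List.pyGetD_of_nonneg _ _ (by omega)]
    rw [hc2, pvGetDSetNe _ _ _ _ _ (by omega : m.toNat ≠ i.toNat),
      hc1, pvGetDSetNe _ _ _ _ _ (by omega : (0:Nat) ≠ i.toNat)]
  have hg1m : PySem.List.pyGetD c1 m 0 = PySem.List.pyGetD c m 0 := by
    rw [PySem.List.pyGetD_of_nonneg _ _ (by omega), PySem.List.pyGetD_of_nonneg _ _ (by omega),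
      hc1, pvGetDSetNe _ _ _ _ _ (by omega : (0:Nat) ≠ m.toNat)]
  have hg2m : PySem.List.pyGetD c2 m 0 = PySem.List.pyGetD c m 0 - 1 := by
    have hmlt : m.toNat < c1.length := by
      rw [hc1, List.length_set]; omega
    rw [PySem.List.pyGetD_of_nonneg _ _ (by omega), hc2]
    rw [List.getD_eq_getElem?_getD, List.getElem?_set, if_pos rfl, if_pos hmlt]
    simp [hg1m]
  refine ⟨L.map (fun i => PySem.List.pyGetD c i 0), R.map (fun i => PySem.List.pyGetD c i 0), ?_, ?_⟩
  · rw [window, hLR]; simp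
  · have hLmap : L.map (fun i => PySem.List.pyGetD c2 i 0) = L.map (fun i => PySem.List.pyGetD c i 0) := by
      apply List.map_congr_left
      intro i hi
      exact hgeq i (hLR ▸ List.mem_append_left _ hi) (fun h => hmL (h ▸ hi))
    have hRmap : R.map (fun i => PySem.List.pyGetD c2 i 0) = R.map (fun i => PySem.List.pyGetD c i 0) := by
      apply List.map_congr_left
      intro i hi
      exact hgeq i (hLR ▸ List.mem_append_right _ (List.mem_cons_of_mem _ hi))
        (fun h => hmR (h ▸ hi))
    rw [window, hLR]
    simp only [List.map_append, List.map_cons]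
    rw [hLmap, hRmap, hg2m]

-- A's loop returns cnt + (the least sufficient number of transfers)
theorem loopA : ∀ (n : Nat) (c : List Int) (N cnt a : Int), 2 ≤ N → N ≤ (c.length : Int) →
    a.toNat = n → IsAns (PySem.List.pyGetD c 0 0) (window c N) a →
    solutionLoop c N cnt = cnt + a := by
  intro n
  induction n using Nat.strong_induction_on with
  | _ n ih =>
  intro c N cnt a hN hlen hn hans
  have hc : c ≠ [] := by
    intro h; rw [h] at hlen; simp at hlen; omega
  obtain ⟨ha0, haf, ham⟩ := hans
  have hspec := pvArgmaxSpec (fun j => PySem.List.pyGetD c j 0) (PySem.List.pyRange 1 N) 0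
  rw [show (PySem.List.pyRange 1 N).foldl
      (fun m i => if PySem.List.pyGetD c m 0 ≤ PySem.List.pyGetD c i 0 then i else m) 0 = pyArgMax c N from rfl] at hspec
  obtain ⟨hmem, hge, hub⟩ := hspec
  by_cases hm : pyArgMax c N = 0
  · rw [solutionLoop, if_pos (Or.inl hm)]
    -- every opponent is strictly below Dasom, so the answer is 0
    have hall : ∀ i ∈ PySem.List.pyRange 1 N, PySem.List.pyGetD c i 0 < PySem.List.pyGetD c 0 0 := by
      apply pvArgmaxStay
      · intro h0
        have := (PySem.List.mem_pyRange_one.mp h0).1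
        omega
      · exact hm
    have hf0 : needLoop (PySem.List.pyGetD c 0 0) 0 (window c N) ≤ 0 := by
      rw [need_zero_of_all_lt]
      intro v hv
      obtain ⟨i, hi, rfl⟩ := List.mem_map.mp hv
      have := hall i hi
      omega
    have : a = 0 := by
      by_contra h
      exact ham 0 le_rfl (by omega) hf0
    omega
  · rcases hmem with hmem | hmem
    · exact absurd hmem hm
    rw [solutionLoop, if_neg (by simp [hm, hc])]
    obtain ⟨l, r, hw1, hw2⟩ := window_step c N hlen hmem
    have hdM : PySem.List.pyGetD c 0 0 ≤ PySem.List.pyGetD c (pyArgMax c N) 0 := hge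
    have hubM : ∀ v ∈ l ++ PySem.List.pyGetD c (pyArgMax c N) 0 :: r,
        v ≤ PySem.List.pyGetD c (pyArgMax c N) 0 := by
      intro v hv
      rw [← hw1] at hv
      obtain ⟨i, hi, rfl⟩ := List.mem_map.mp hv
      exact hub i hi
    -- the answer is at least 1
    have hnot0 : ¬ needLoop (PySem.List.pyGetD c 0 0) 0 (window c N) ≤ 0 := by
      have hvmem : PySem.List.pyGetD c (pyArgMax c N) 0 ∈ window c N := by
        rw [hw1]; exact List.mem_append_right _ List.mem_cons_self
      have := need_pos (PySem.List.pyGetD c 0 0) 0 (window c N) hvmem (by omega)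
      omega
    have ha1 : 1 ≤ a := by
      by_contra h
      have : a = 0 := by omega
      rw [this] at haf
      exact hnot0 haf
    set m := pyArgMax c N with hmdef
    set c2 := (c.set 0 (PySem.List.pyGetD c 0 0 + 1)).set m.toNat
      (PySem.List.pyGetD (c.set 0 (PySem.List.pyGetD c 0 0 + 1)) m 0 - 1) with hc2
    have hm1 : 1 ≤ m := (PySem.List.mem_pyRange_one.mp hmem).1
    have hlen0 : 0 < c.length := List.length_pos_iff.mpr hc
    have hd2 : PySem.List.pyGetD c2 0 0 = PySem.List.pyGetD c 0 0 + 1 := by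
      rw [PySem.List.pyGetD_zero, hc2, pvGetDSetNe _ _ _ _ _ (by omega : m.toNat ≠ 0)]
      rw [List.getD_eq_getElem?_getD, List.getElem?_set, if_pos rfl, if_pos hlen0]
      simp [PySem.List.pyGetD_zero, List.getD_eq_getElem?_getD]
    have hlen2 : N ≤ (c2.length : Int) := by
      rw [hc2]; simpa using hlen
    have hstep := fun (k : Int) (hk : 0 ≤ k) =>
      step_iff l r (PySem.List.pyGetD c 0 0) (PySem.List.pyGetD c m 0) k hubM hk
    have hans2 : IsAns (PySem.List.pyGetD c2 0 0) (window c2 N) (a - 1) := by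
      rw [hd2, hw2]
      refine ⟨by omega, ?_, ?_⟩
      · have hfa : needLoop (PySem.List.pyGetD c 0 0) ((a - 1) + 1)
            (l ++ PySem.List.pyGetD c m 0 :: r) ≤ (a - 1) + 1 := by
          rw [show (a - 1) + 1 = a from by ring, ← hw1]
          exact haf
        exact (hstep (a - 1) (by omega)).mp hfa
      · intro j hj0 hja hfeas
        have := (hstep j hj0).mpr hfeas
        rw [← hw1] at this
        exact ham (j + 1) (by omega) (by omega) this
    have := ih (a - 1).toNat (by omega) c2 N (cnt + 1) (a - 1) hN hlen2 rfl hans2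
    rw [this]
    ring

-- B's binary search returns the least sufficient k
theorem bsLoop_isAns : ∀ (fuel : Nat) (d : Int) (vs : List Int) (lo hi : Int),
    (hi - lo).toNat = fuel → 0 ≤ lo → lo ≤ hi → needLoop d hi vs ≤ hi →
    (∀ j : Int, 0 ≤ j → j < lo → ¬ needLoop d j vs ≤ j) →
    IsAns d vs (bsLoop d vs lo hi) := by
  intro fuel
  induction fuel using Nat.strong_induction_on with
  | _ fuel ih =>
  intro d vs lo hi hfuel hlo0 hlohi hfhi hmin
  rw [bsLoop]
  by_cases hlt : lo < hi
  · rw [if_pos hlt]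
    have h1 := (PySem.Int.le_floordiv_iff_mul_le (a := lo + hi) (q := lo) (by omega : (0:Int) < 2)).mpr (by omega)
    have h2 := (PySem.Int.floordiv_lt_iff_lt_mul (a := lo + hi) (q := hi) (by omega : (0:Int) < 2)).mpr (by omega)
    set mid := PySem.Int.floordiv (lo + hi) 2 with hmid
    by_cases hfm : needLoop d mid vs ≤ mid
    · rw [if_pos hfm]
      exact ih (mid - lo).toNat (by omega) d vs lo mid rfl hlo0 (by omega) hfm hmin
    · rw [if_neg hfm]
      apply ih (hi - (mid + 1)).toNat (by omega) d vs (mid + 1) hi rfl (by omega) (by omega) hfhi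
      intro j hj0 hj
      by_cases hjlo : j < lo
      · exact hmin j hj0 hjlo
      · intro hfj
        exact hfm (le_trans (need_mono d vs (by omega : j ≤ mid)) (le_trans hfj (by omega)))
  · rw [if_neg hlt]
    have : lo = hi := by omega
    exact ⟨hlo0, by rw [this]; exact hfhi, hmin⟩

theorem slice_eq_window (c : List Int) (N : Int) (hN : 2 ≤ N) (hlen : N ≤ (c.length : Int)) :
    PySem.List.slice c (some 1) (some N) = window c N := by
  rw [PySem.List.slice_of_nonneg c (by omega) (by omega) (by exact_mod_cast by omega) hlen]
  apply List.ext_getElem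
  · simp [window, PySem.List.length_pyRange_one]
    omega
  · intro k h1 h2
    simp only [window, List.getElem_map]
    rw [PySem.List.getElem_pyRange_one]
    have hk : k < N.toNat - 1 := by
      simp at h1; omega
    have hkl : 1 + k < c.length := by omega
    rw [List.getElem_take, List.getElem_drop]
    rw [PySem.List.pyGetD_eq_getElem _ _ (by omega) (by push_cast; omega)]
    congr 1

theorem alt_isAns (c : List Int) (N : Int) (hN : 2 ≤ N) (hlen : N ≤ (c.length : Int)) :
    IsAns (PySem.List.pyGetD c 0 0) (window c N) (solution_alt c N) := by
  unfold solution_alt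
  rw [if_neg (by omega : ¬ N ≤ 1)]
  rw [slice_eq_window c N hN hlen]
  have hne : window c N ≠ [] := by
    have : (window c N).length = (N - 1).toNat := by
      simp [window, PySem.List.length_pyRange_one]
    intro h
    rw [h] at this
    simp at this
    omega
  obtain ⟨mv, hmv⟩ : ∃ mv, PySem.List.max? (window c N) (fun v => v) = some mv := by
    cases h : PySem.List.max? (window c N) (fun v => v) with
    | none => exact absurd ((PySem.List.max?_eq_none_iff _ _).mp h) hne
    | some mv => exact ⟨mv, rfl⟩
  rw [hmv]
  simp only [Option.getD_some]
  set d := PySem.List.pyGetD c 0 0 with hd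
  set hi := max (mv - d + 1) 0 with hhi
  have hub := PySem.List.max?_isMax hmv
  have hfhi : needLoop d hi (window c N) ≤ hi := by
    rw [need_zero_of_all_lt]
    · omega
    · intro v hv
      have := hub v hv
      simp only at this
      omega
  exact bsLoop_isAns (hi - 0).toNat d (window c N) 0 hi rfl le_rfl (by omega) hfhi
    (by intro j hj0 hj; omega)

-- ===== VERDICT (by name: the statement is the Claim_ definition above) =====
theorem solution_spec : Claim_equal_solution := by
  intro c N _ hpre
  unfold Spec_solution
  by_cases hN : N ≤ 1
  · have hm : pyArgMax c N = 0 := by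
      unfold pyArgMax
      rw [PySem.List.pyRange_one_eq_nil (by omega)]
      rfl
    rw [solution, solutionLoop, if_pos (Or.inl hm), solution_alt, if_pos hN]
  · have hlen : N ≤ (c.length : Int) := by
      rcases hpre with h | h
      · omega
      · exact h
    have hB := alt_isAns c N (by omega) hlen
    have hA := loopA (solution_alt c N).toNat c N 0 (solution_alt c N) (by omega) hlen rfl hB
    have hone : solution c N = 0 + solution_alt c N := hA
    omega
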